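-- pv_equiv track=rewrite | github.com/mhmadam/quera-problemset | university/277/hex numbers.py | calcnum
-- ===== SOURCE A (Python) =====
-- def checknum(n):
--     for i in range(2,10):
--         if str(i) in str(n):
--             return False
--     return True
--
-- def getrange(n):
--     j = 1
--     for i in range(n):
--         j += pow(10,i)
--     return j
--
-- def calcnum(n):
--     r = 0
--     if n >= getrange(len(str(n)))-1:
--         r = pow(2,len(str(n)))-1
--     else:
--         r = pow(2,len(str(n))-1)-1
--         for j in range(pow(10,len(str(n))-1),getrange(len(str(n)))):
--             if j > n:
--                 break
--             elif checknum(j):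
--                 r += 1
--     return r
-- ===== SOURCE B (Python) =====
-- def calcnum(n):
--     # Count the positive numbers whose decimal digits are all 0/1 and that are <= n.
--     # They are exactly the binary numerals read in base 10, in increasing order, so the
--     # answer is the index of the largest such numeral <= n: one left-to-right digit scan.
--     if n <= 0:
--         return 0
--     r = 0
--     s = str(n)
--     for k, c in enumerate(s):
--         if c == '0':
--             r = 2 * r
--         elif c == '1':
--             r = 2 * r + 1
--         else:
--             rest = len(s) - k - 1
--             return (2 * r + 1) * 2 ** rest + (2 ** rest - 1)
--     return r
-- ===== Notes on version B (the rewrite author's own statement) =====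
-- stated objective: faster
-- what changed: A scans every integer from 10^(d-1) up to n testing each one's decimal string for digits 2-9; B does a single left-to-right digit-DP scan of str(n), reading the 0/1-numerals as binary, so the count is computed in O(d) arithmetic steps with no enumeration.
-- intended difference: For negative n A returns 2^(digits of |n|)-1 (e.g. 1 for n=-5), an artefact of taking len(str(n)) including the '-' sign; B returns 0, the intended count since no positive 0/1-digit number is <= a negative n. — e.g. on calcnum(-5): A returns 1, B returns 0
import Mathlib
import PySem

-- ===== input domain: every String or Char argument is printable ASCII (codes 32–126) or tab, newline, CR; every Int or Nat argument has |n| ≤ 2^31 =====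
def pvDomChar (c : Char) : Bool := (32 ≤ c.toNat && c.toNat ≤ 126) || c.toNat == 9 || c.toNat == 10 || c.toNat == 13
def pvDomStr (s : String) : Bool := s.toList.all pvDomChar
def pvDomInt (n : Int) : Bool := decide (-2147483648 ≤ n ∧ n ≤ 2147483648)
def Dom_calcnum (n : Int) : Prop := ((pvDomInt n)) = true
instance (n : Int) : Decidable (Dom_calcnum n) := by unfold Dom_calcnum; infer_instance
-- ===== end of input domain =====

-- B replaces A's scan over every integer up to n by one left-to-right digit-DP pass over str(n) (faster; asymptotic).

-- ===== PORT A =====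
-- 'for i in range(2,10): if str(i) in str(n): return False' (early return = recursion over the range list)
def checknumLoop (n : Int) : List Int → Bool
  | [] => true
  | i :: rest =>
    if PySem.Str.isIn (PySem.Int.toStr i) (PySem.Int.toStr n) then false
    else checknumLoop n rest

def checknum (n : Int) : Bool := checknumLoop n (PySem.List.pyRange 2 10 1)

-- pow(10, i): here i ranges over range(n) so i ≥ 0 and 10 ** i is 10 ^ i.toNat (exact)
def getrange (n : Int) : Int :=
  (PySem.List.pyRange 0 n 1).foldl (fun j i => j + 10 ^ i.toNat) 1

-- 'for j in range(lo, hi): if j > n: break elif checknum(j): r += 1' — fuel = length of the range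
def calcLoopA (n : Int) : Nat → Int → Int → Int
  | 0, _, r => r
  | fuel+1, j, r =>
    if j > n then r
    else if checknum j then calcLoopA n fuel (j+1) (r+1)
    else calcLoopA n fuel (j+1) r

-- A recomputes len(str(n)) at each use; d below abbreviates that expression textually
def calcnum (n : Int) : Int :=
  if n ≥ getrange (PySem.Str.len (PySem.Int.toStr n)) - 1 then
    2 ^ (PySem.Str.len (PySem.Int.toStr n)).toNat - 1
  else
    calcLoopA n
      (getrange (PySem.Str.len (PySem.Int.toStr n)) - 10 ^ ((PySem.Str.len (PySem.Int.toStr n)) - 1).toNat).toNat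
      (10 ^ ((PySem.Str.len (PySem.Int.toStr n)) - 1).toNat)
      (2 ^ ((PySem.Str.len (PySem.Int.toStr n)) - 1).toNat - 1)

-- ===== PORT B =====
-- the for-loop over enumerate(s): structural recursion; rest = len(s)-k-1 = length of the remaining chars
def altScan : List Char → Int → Int
  | [], r => r
  | c :: w, r =>
    if c = '0' then altScan w (2 * r)
    else if c = '1' then altScan w (2 * r + 1)
    else (2 * r + 1) * 2 ^ w.length + (2 ^ w.length - 1)

def calcnum_alt (n : Int) : Int :=
  if n ≤ 0 then 0 else altScan (PySem.Int.toChars n) 0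

-- ===== PRECONDITION & SPEC =====
-- For negative n A returns 2^(digits of |n|)-1 (e.g. 1 for n=-5), an artefact of taking len(str(n))
-- including the '-' sign; B returns 0, the intended count since no positive 0/1-digit number is ≤ a negative n.
def D_calcnum (n : Int) : Prop := n < 0
instance (n : Int) : Decidable (D_calcnum n) := by unfold D_calcnum; infer_instance

def Spec_calcnum (n : Int) (out : Int) : Prop := ¬ D_calcnum n → out = calcnum_alt n
instance (n : Int) (out : Int) : Decidable (Spec_calcnum n out) := by unfold Spec_calcnum; infer_instance

def pvDiffWitness_calcnum : Int := (-5)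
def pvDiffWitnessOut_calcnum : Int × Int := (1, 0)

-- ===== CLAIM (what is proved, stated in full; the proofs are below) =====
def Claim_unchanged_calcnum : Prop := ∀ (n : Int), Dom_calcnum n → Spec_calcnum n (calcnum n)
def Claim_changed_calcnum : Prop := Dom_calcnum (pvDiffWitness_calcnum) ∧ D_calcnum (pvDiffWitness_calcnum) ∧ calcnum (pvDiffWitness_calcnum) = pvDiffWitnessOut_calcnum.1 ∧ calcnum_alt (pvDiffWitness_calcnum) = pvDiffWitnessOut_calcnum.2 ∧ pvDiffWitnessOut_calcnum.1 ≠ pvDiffWitnessOut_calcnum.2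
def Claim_exact_calcnum : Prop := ∀ (n : Int), Dom_calcnum n → D_calcnum n → calcnum n ≠ calcnum_alt n

-- ===== LEMMAS AND PROOFS =====

/- `dec k` reads the binary digits of `k` as a decimal numeral: the k-th positive number
   all of whose decimal digits are 0 or 1 (dec 0 = 0). -/
def dec : ℕ → ℕ
  | 0 => 0
  | k+1 => 10 * dec ((k+1)/2) + (k+1) % 2
decreasing_by omega

/- inverse of `dec` on 0/1-digit numbers: read decimal digits as binary -/
def enc : ℕ → ℕ
  | 0 => 0
  | m+1 => 2 * enc ((m+1)/10) + (m+1) % 10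
decreasing_by omega

def only01 (m : ℕ) : Bool := (Nat.digits 10 m).all (· ≤ 1)

lemma dec_eq (k : ℕ) (h : k ≠ 0) : dec k = 10 * dec (k/2) + k % 2 := by
  cases k with
  | zero => exact absurd rfl h
  | succ k => simp [dec]

lemma dec_pos : ∀ k : ℕ, 0 < k → 0 < dec k := by
  intro k
  induction k using Nat.strong_induction_on with
  | _ k ih =>
    intro hk
    rw [dec_eq k (by omega)]
    rcases Nat.lt_or_ge k 2 with h2 | h2
    · have hk1 : k = 1 := by omega
      subst hk1
      simp [dec]
    · have := ih (k/2) (by omega) (by omega)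
      omega

lemma dec_lt_pow : ∀ (e k : ℕ), k < 2 ^ e → dec k < 10 ^ e := by
  intro e
  induction e with
  | zero =>
    intro k hk
    have : k = 0 := by omega
    subst this
    simp [dec]
  | succ e ih =>
    intro k hk
    rcases Nat.eq_zero_or_pos k with rfl | hpos
    · simp only [dec]
      positivity
    · rw [dec_eq k (by omega)]
      have h2 : k / 2 < 2 ^ e := by omega
      have := ih (k/2) h2
      have hm : k % 2 ≤ 1 := by omega
      calc 10 * dec (k/2) + k % 2 < 10 * 10 ^ e := by omega
        _ = 10 ^ (e+1) := by ring

lemma pow_le_dec : ∀ (e k : ℕ), 2 ^ e ≤ k → 10 ^ e ≤ dec k := by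
  intro e
  induction e with
  | zero => intro k hk; simpa using dec_pos k (by omega)
  | succ e ih =>
    intro k hk
    have hk0 : k ≠ 0 := by
      have : (0:ℕ) < 2 ^ (e+1) := by positivity
      omega
    rw [dec_eq k hk0]
    have hdiv : 2 ^ e ≤ k / 2 := by
      have h2 : (2:ℕ)^(e+1) = 2 * 2^e := by ring
      omega
    have := ih (k/2) hdiv
    have : 10 ^ (e+1) = 10 * 10 ^ e := by ring
    omega

lemma dec_mono : ∀ (m k : ℕ), k < m → dec k < dec m := by
  intro m
  induction m using Nat.strong_induction_on with
  | _ m ih =>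
    intro k hk
    rcases Nat.eq_zero_or_pos k with rfl | hkpos
    · simpa [dec] using dec_pos m (by omega)
    · have hek := dec_eq k (by omega)
      have hem := dec_eq m (by omega)
      rw [hek, hem]
      rcases Nat.lt_or_ge (k/2) (m/2) with h | h
      · have := ih (m/2) (by omega) (k/2) h
        omega
      · have h2 : k / 2 = m / 2 := by omega
        have h3 : k % 2 = 0 ∧ m % 2 = 1 := by omega
        rw [h2]
        omega

lemma dec_strictMono : StrictMono dec := fun _ _ h => dec_mono _ _ h

lemma le_dec_self (k : ℕ) : k ≤ dec k := dec_strictMono.le_apply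

lemma dec_add_pow : ∀ (e k : ℕ), k < 2 ^ e → dec (2 ^ e + k) = 10 ^ e + dec k := by
  intro e
  induction e with
  | zero =>
    intro k hk
    have : k = 0 := by omega
    subst this
    rw [show 2^0 + 0 = 1 from rfl, dec_eq 1 (by omega)]
    simp [dec]
  | succ e ih =>
    intro k hk
    have hne : 2 ^ (e+1) + k ≠ 0 := by positivity
    rw [dec_eq _ hne]
    have hdiv : (2 ^ (e+1) + k) / 2 = 2 ^ e + k / 2 := by
      omega
    have hmod : (2 ^ (e+1) + k) % 2 = k % 2 := by
      omega
    have hk2 : k / 2 < 2 ^ e := by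
      have h2 : (2:ℕ)^(e+1) = 2 * 2^e := by ring
      omega
    rw [hdiv, hmod, ih (k/2) hk2]
    rcases Nat.eq_zero_or_pos k with rfl | hkpos
    · simp [dec]
      ring
    · rw [dec_eq k (by omega)]
      ring

lemma only01_iff (m : ℕ) : only01 m = true ↔ ∀ d ∈ Nat.digits 10 m, d ≤ 1 := by
  simp [only01]

lemma only01_dec : ∀ k : ℕ, only01 (dec k) = true := by
  intro k
  induction k using Nat.strong_induction_on with
  | _ k ih =>
    rcases Nat.eq_zero_or_pos k with rfl | hk
    · simp [dec, only01]
    · rw [only01_iff]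
      have hdpos : 0 < dec k := dec_pos k hk
      rw [Nat.digits_def' (by norm_num : (1:ℕ) < 10) hdpos]
      rw [dec_eq k (by omega)]
      intro d hd
      rcases List.mem_cons.mp hd with h | h
      · omega
      · have hmod : (10 * dec (k/2) + k % 2) / 10 = dec (k/2) := by omega
        rw [hmod] at h
        exact (only01_iff _).mp (ih (k/2) (by omega)) d h

lemma dec_enc : ∀ m : ℕ, only01 m = true → dec (enc m) = m := by
  intro m
  induction m using Nat.strong_induction_on with
  | _ m ih =>
    intro h01
    rcases Nat.eq_zero_or_pos m with rfl | hm
    · simp [enc, dec]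
    · have hdig := Nat.digits_def' (by norm_num : (1:ℕ) < 10) hm
      rw [only01_iff, hdig] at h01
      have hmod : m % 10 ≤ 1 := h01 _ (List.mem_cons_self)
      have htail : only01 (m / 10) = true := by
        rw [only01_iff]; intro d hd; exact h01 d (List.mem_cons_of_mem _ hd)
      have henc : enc m = 2 * enc (m/10) + m % 10 := by
        cases m with
        | zero => omega
        | succ m' => simp [enc]
      have hIH : dec (enc (m/10)) = m / 10 := by
        rcases Nat.eq_zero_or_pos (m/10) with hz | hp
        · simp [hz, enc, dec]
        · exact ih (m/10) (by omega) htail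
      rcases Nat.eq_zero_or_pos (enc m) with hz | hp
      · -- then m % 10 = 0 and enc (m/10) = 0, so m/10 = dec 0 = 0, m = 0: contradiction
        rw [henc] at hz
        have h1 : m % 10 = 0 := by omega
        have h2 : enc (m/10) = 0 := by omega
        rw [h2] at hIH
        simp [dec] at hIH
        omega
      · rw [dec_eq _ (by omega), henc]
        have hdiv : (2 * enc (m/10) + m % 10) / 2 = enc (m/10) := by omega
        have hmod2 : (2 * enc (m/10) + m % 10) % 2 = m % 10 := by omega
        rw [hdiv, hmod2, hIH]
        omega

/- Kmax n = the largest k with dec k ≤ n -/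
def Kmax (n : ℕ) : ℕ := Nat.findGreatest (fun k => dec k ≤ n) n

lemma dec_zero : dec 0 = 0 := by simp [dec]

lemma Kmax_spec (n : ℕ) : dec (Kmax n) ≤ n := by
  apply Nat.findGreatest_spec (P := fun k => dec k ≤ n) (m := 0) (by omega)
  rw [dec_zero]
  omega

lemma le_Kmax {n k : ℕ} (h : dec k ≤ n) : k ≤ Kmax n := by
  by_contra hc
  push_neg at hc
  unfold Kmax at hc
  have := Nat.findGreatest_is_greatest (P := fun k => dec k ≤ n) (n := n) hc (le_trans (le_dec_self k) h)
  exact this h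

lemma Kmax_lt {n k : ℕ} (h : n < dec k) : Kmax n < k := by
  by_contra hc
  push_neg at hc
  exact absurd (le_trans (dec_strictMono.monotone hc) (Kmax_spec n)) (by omega)

lemma Kmax_eq_of (n k : ℕ) (h1 : dec k ≤ n) (h2 : n < dec (k+1)) : Kmax n = k :=
  le_antisymm (by have := Kmax_lt h2; omega) (le_Kmax h1)

lemma Kmax_succ (n : ℕ) : Kmax (n+1) = Kmax n + (if only01 (n+1) then 1 else 0) := by
  by_cases h : only01 (n+1) = true
  · simp only [h, if_true]
    set k0 := enc (n+1) with hk0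
    have hdk0 : dec k0 = n + 1 := dec_enc _ h
    have hk0pos : 0 < k0 := by
      rcases Nat.eq_zero_or_pos k0 with hz | hp
      · rw [hz] at hdk0; simp [dec] at hdk0
      · exact hp
    have h1 : Kmax (n+1) = k0 := by
      apply le_antisymm
      · by_contra hc
        push_neg at hc
        have := dec_mono _ _ hc
        rw [hdk0] at this
        exact absurd (Kmax_spec (n+1)) (by omega)
      · exact le_Kmax (by omega)
    have h2 : Kmax n = k0 - 1 := by
      apply Kmax_eq_of
      · have := dec_mono k0 (k0 - 1) (by omega)
        omega
      · have : k0 - 1 + 1 = k0 := by omega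
        rw [this, hdk0]; omega
    omega
  · rw [if_neg h]
    have hne : ∀ k, dec k ≠ n + 1 := by
      intro k hk
      exact absurd (hk ▸ only01_dec k) (by simpa using h)
    have hmain : Kmax (n+1) = Kmax n := by
      apply le_antisymm
      · exact le_Kmax (by have := Kmax_spec (n+1); have := hne (Kmax (n+1)); omega)
      · exact le_Kmax (by have := Kmax_spec n; omega)
    omega

def F (n : ℕ) : ℕ := (List.range (n+1)).countP (fun m => only01 m && decide (0 < m))

lemma F_succ (n : ℕ) : F (n+1) = F n + (if only01 (n+1) then 1 else 0) := by
  unfold F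
  rw [List.range_succ, List.countP_append]
  by_cases h : only01 (n+1) = true
  · simp [List.countP_cons, h]
  · simp [List.countP_cons, h]

lemma F_eq_Kmax : ∀ n, F n = Kmax n := by
  intro n
  induction n with
  | zero =>
    have h1 : F 0 = 0 := by
      unfold F
      rw [List.range_succ]
      simp [only01]
    have h2 : Kmax 0 = 0 := by simp [Kmax]
    omega
  | succ n ih => rw [F_succ, Kmax_succ, ih]

/- big-endian digit value and the greedy scan spec -/
def vval : List ℕ → ℕ
  | [] => 0
  | c :: w => c * 10 ^ w.length + vval w

def ks : List ℕ → ℕ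
  | [] => 0
  | c :: w => if c = 0 then ks w else if c = 1 then 2 ^ w.length + ks w else 2 ^ (w.length + 1) - 1

lemma vval_lt (w : List ℕ) (h : ∀ d ∈ w, d < 10) : vval w < 10 ^ w.length := by
  induction w with
  | nil => simp [vval]
  | cons c w ih =>
    have hc : c < 10 := h c List.mem_cons_self
    have := ih (fun d hd => h d (List.mem_cons_of_mem _ hd))
    simp only [vval, List.length_cons]
    calc c * 10 ^ w.length + vval w < c * 10 ^ w.length + 10 ^ w.length := by omega
      _ = (c + 1) * 10 ^ w.length := by ring
      _ ≤ 10 * 10 ^ w.length := by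
          have : c + 1 ≤ 10 := by omega
          exact Nat.mul_le_mul_right _ this
      _ = 10 ^ (w.length + 1) := by ring

lemma ks_lt (w : List ℕ) : ks w < 2 ^ w.length := by
  induction w with
  | nil => simp [ks]
  | cons c w ih =>
    simp only [ks, List.length_cons]
    split_ifs with h0 h1
    · have : (2:ℕ)^w.length ≤ 2^(w.length+1) := by
        exact Nat.pow_le_pow_right (by omega) (by omega)
      omega
    · have : (2:ℕ)^(w.length+1) = 2 * 2^w.length := by ring
      omega
    · have : (0:ℕ) < 2^(w.length+1) := by positivity
      omega

lemma ks_dec_le (w : List ℕ) (h : ∀ d ∈ w, d < 10) : dec (ks w) ≤ vval w := by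
  induction w with
  | nil => simp [ks, vval, dec]
  | cons c w ih =>
    have hc : c < 10 := h c List.mem_cons_self
    have htail := ih (fun d hd => h d (List.mem_cons_of_mem _ hd))
    simp only [ks, vval]
    split_ifs with h0 h1
    · subst h0; simpa using htail
    · subst h1
      rw [dec_add_pow _ _ (ks_lt w)]
      omega
    · -- c ≥ 2 : dec (2^(e+1)-1) = 10^e + dec (2^e-1) < 2·10^e ≤ c·10^e
      have hc2 : 2 ≤ c := by omega
      have hsplit : 2 ^ (w.length + 1) - 1 = 2 ^ w.length + (2 ^ w.length - 1) := by
        have : (0:ℕ) < 2 ^ w.length := by positivity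
        have h2 : (2:ℕ)^(w.length+1) = 2 * 2^w.length := by ring
        omega
      rw [hsplit, dec_add_pow _ _ (Nat.sub_lt (by positivity) one_pos)]
      have := dec_lt_pow w.length (2 ^ w.length - 1) (Nat.sub_lt (by positivity) one_pos)
      have h2le : 2 * 10 ^ w.length ≤ c * 10 ^ w.length := Nat.mul_le_mul_right _ hc2
      omega

lemma ks_ge (w : List ℕ) (h : ∀ d ∈ w, d < 10) :
    ∀ k, k < 2 ^ w.length → dec k ≤ vval w → k ≤ ks w := by
  induction w with
  | nil => intro k hk _; simp at hk; omega
  | cons c w ih =>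
    intro k hk hdec
    have hc : c < 10 := h c List.mem_cons_self
    have htail := ih (fun d hd => h d (List.mem_cons_of_mem _ hd))
    simp only [ks]
    simp only [vval] at hdec
    split_ifs with h0 h1
    · subst h0
      rcases Nat.lt_or_ge k (2 ^ w.length) with hlt | hge
      · exact htail k hlt (by simpa using hdec)
      · exfalso
        have := pow_le_dec w.length k hge
        have := vval_lt w (fun d hd => h d (List.mem_cons_of_mem _ hd))
        simp at hdec
        omega
    · subst h1
      rcases Nat.lt_or_ge k (2 ^ w.length) with hlt | hge
      · omega
      · have hk' : k - 2 ^ w.length < 2 ^ w.length := by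
          simp only [List.length_cons] at hk
          have : (2:ℕ)^(w.length+1) = 2 * 2^w.length := by ring
          omega
        have hrw : k = 2 ^ w.length + (k - 2 ^ w.length) := by omega
        rw [hrw] at hdec ⊢
        rw [dec_add_pow _ _ hk'] at hdec
        have := htail (k - 2 ^ w.length) hk' (by omega)
        omega
    · simp only [List.length_cons] at hk
      omega

lemma ks_eq_Kmax (w : List ℕ) (h : ∀ d ∈ w, d < 10) : ks w = Kmax (vval w) := by
  apply le_antisymm
  · exact le_Kmax (ks_dec_le w h)
  · apply ks_ge w h
    · by_contra hc
      push_neg at hc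
      have := pow_le_dec w.length _ hc
      have h2 := Kmax_spec (vval w)
      have := vval_lt w h
      omega
    · exact Kmax_spec (vval w)

/- digits of n, big-endian -/
def bigDigits (m : ℕ) : List ℕ := (Nat.digits 10 m).reverse

lemma bigDigits_lt (m : ℕ) : ∀ d ∈ bigDigits m, d < 10 := by
  intro d hd
  exact Nat.digits_lt_base (by norm_num) (List.mem_reverse.mp hd)

lemma vval_append_single (u : List ℕ) (c : ℕ) : vval (u ++ [c]) = 10 * vval u + c := by
  induction u with
  | nil => simp [vval]
  | cons a u ih =>
    simp only [List.cons_append, vval, List.length_append, List.length_cons, List.length_nil, ih]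
    ring

lemma vval_bigDigits : ∀ m : ℕ, vval (bigDigits m) = m := by
  intro m
  induction m using Nat.strong_induction_on with
  | _ m ih =>
    rcases Nat.eq_zero_or_pos m with rfl | hm
    · simp [bigDigits, vval]
    · unfold bigDigits
      rw [Nat.digits_def' (by norm_num : (1:ℕ) < 10) hm]
      rw [List.reverse_cons]
      rw [vval_append_single]
      have : vval (bigDigits (m/10)) = m / 10 := ih (m/10) (by omega)
      unfold bigDigits at this
      omega

/- ===== bridge: Nat.toDigits ↔ Nat.digits ===== -/
lemma toDigitsCore_eq : ∀ (f m : ℕ) (l : List Char), m < f → m ≠ 0 →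
    Nat.toDigitsCore 10 f m l = ((Nat.digits 10 m).map Nat.digitChar).reverse ++ l := by
  intro f
  induction f with
  | zero => intro m l h _; omega
  | succ f ih =>
    intro m l hmf hm0
    have hstep : Nat.toDigitsCore 10 (f+1) m l =
        (if m / 10 = 0 then (m % 10).digitChar :: l
         else Nat.toDigitsCore 10 f (m/10) ((m % 10).digitChar :: l)) := rfl
    rw [hstep]
    rw [Nat.digits_def' (by norm_num : (1:ℕ) < 10) (by omega)]
    by_cases hd : m / 10 = 0
    · simp [hd]
    · rw [if_neg hd]
      rw [ih (m/10) ((m % 10).digitChar :: l) (by omega) hd]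
      simp

lemma toDigits_eq (m : ℕ) (hm : m ≠ 0) :
    Nat.toDigits 10 m = ((Nat.digits 10 m).map Nat.digitChar).reverse := by
  have := toDigitsCore_eq (m+1) m [] (by omega) hm
  simpa [Nat.toDigits] using this

lemma toChars_natCast (m : ℕ) (hm : m ≠ 0) :
    PySem.Int.toChars (m : Int) = (bigDigits m).map Nat.digitChar := by
  unfold PySem.Int.toChars
  rw [if_neg (by omega)]
  have : ((m : Int)).toNat = m := rfl
  rw [this, toDigits_eq m hm]
  simp [bigDigits, List.map_reverse]

/- ===== checknum ↔ only01 ===== -/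
lemma checknumLoop_iff (n : Int) (L : List Int) :
    checknumLoop n L = true ↔ ∀ i ∈ L, PySem.Str.isIn (PySem.Int.toStr i) (PySem.Int.toStr n) = false := by
  induction L with
  | nil => simp [checknumLoop]
  | cons i L ih =>
    simp only [checknumLoop]
    by_cases h : PySem.Str.isIn (PySem.Int.toStr i) (PySem.Int.toStr n) = true
    · rw [if_pos h]
      constructor
      · intro hf; exact absurd hf (by simp)
      · intro hall
        have hfi := hall i List.mem_cons_self
        rw [hfi] at h
        exact absurd h (by simp)
    · rw [if_neg h, ih]
      constructor
      · intro hall a ha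
        rcases List.mem_cons.mp ha with rfl | ha'
        · exact Bool.not_eq_true _ ▸ (Bool.eq_false_iff.mpr h)
        · exact hall a ha'
      · intro hall a ha
        exact hall a (List.mem_cons_of_mem _ ha)

lemma digitChar_inj_lt (d e : ℕ) (hd : d < 10) (he : e < 10) :
    Nat.digitChar d = Nat.digitChar e ↔ d = e := by
  interval_cases d <;> interval_cases e <;> simp_all <;> decide

lemma checknum_eq (m : ℕ) : checknum (m : Int) = only01 m := by
  rcases Nat.eq_zero_or_pos m with rfl | hm
  · decide
  · rw [Bool.eq_iff_iff]
    unfold checknum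
    rw [checknumLoop_iff, only01_iff]
    have hR : PySem.List.pyRange 2 10 1 = [2,3,4,5,6,7,8,9] := by decide
    rw [hR]
    have hchars : PySem.Int.toChars (m:Int) = (bigDigits m).map Nat.digitChar :=
      toChars_natCast m (by omega)
    have hbridge : ∀ i : Int,
        (PySem.Str.isIn (PySem.Int.toStr i) (PySem.Int.toStr (m:Int)) = false) ↔
          ¬ (PySem.Int.toChars i <:+: PySem.Int.toChars (m:Int)) := by
      intro i
      rw [Bool.eq_false_iff, Ne, PySem.Str.isIn_iff_infix,
        PySem.Int.toList_toStr, PySem.Int.toList_toStr]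
    simp only [List.forall_mem_cons]
    rw [hbridge 2, hbridge 3, hbridge 4, hbridge 5, hbridge 6, hbridge 7, hbridge 8, hbridge 9]
    rw [show PySem.Int.toChars 2 = ['2'] from by decide,
        show PySem.Int.toChars 3 = ['3'] from by decide,
        show PySem.Int.toChars 4 = ['4'] from by decide,
        show PySem.Int.toChars 5 = ['5'] from by decide,
        show PySem.Int.toChars 6 = ['6'] from by decide,
        show PySem.Int.toChars 7 = ['7'] from by decide,
        show PySem.Int.toChars 8 = ['8'] from by decide,
        show PySem.Int.toChars 9 = ['9'] from by decide]
    simp only [List.singleton_infix_iff, hchars, List.mem_map]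
    constructor
    · rintro ⟨h2, h3, h4, h5, h6, h7, h8, h9, -⟩ d hd
      by_contra hc
      have hdlt : d < 10 := Nat.digits_lt_base (by norm_num) hd
      have hdb : d ∈ bigDigits m := List.mem_reverse.mpr hd
      interval_cases d
      · exact h2 ⟨2, hdb, by decide⟩
      · exact h3 ⟨3, hdb, by decide⟩
      · exact h4 ⟨4, hdb, by decide⟩
      · exact h5 ⟨5, hdb, by decide⟩
      · exact h6 ⟨6, hdb, by decide⟩
      · exact h7 ⟨7, hdb, by decide⟩
      · exact h8 ⟨8, hdb, by decide⟩
      · exact h9 ⟨9, hdb, by decide⟩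
    · intro hle
      refine ⟨?_, ?_, ?_, ?_, ?_, ?_, ?_, ?_, by simp⟩ <;>
        (rintro ⟨d, hdb, hdc⟩
         have hd1 : d ≤ 1 := hle d (List.mem_reverse.mp hdb)
         interval_cases d <;> exact absurd hdc (by decide))

/- ===== loop characterisation ===== -/
lemma calcLoopA_eq (n : Int) : ∀ (fuel : ℕ) (j r : Int),
    calcLoopA n fuel j r =
      r + ((PySem.List.pyRange j (j + fuel) 1).countP (fun m => decide (m ≤ n) && checknum m) : ℕ) := by
  intro fuel
  induction fuel with
  | zero =>
    intro j r
    rw [PySem.List.pyRange_one_eq_nil (by omega)]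
    simp [calcLoopA]
  | succ fuel ih =>
    intro j r
    have hcons : PySem.List.pyRange j (j + (fuel+1 : ℕ)) 1 = j :: PySem.List.pyRange (j+1) (j + (fuel+1 : ℕ)) 1 := by
      apply PySem.List.pyRange_one_cons
      push_cast; omega
    have harg : j + ((fuel:Int)+1) = (j + 1) + (fuel : ℕ) := by ring
    rw [hcons, List.countP_cons]
    simp only [calcLoopA]
    by_cases hbr : j > n
    · rw [if_pos hbr]
      have hz : (PySem.List.pyRange (j+1) (j + (fuel+1 : ℕ)) 1).countP (fun m => decide (m ≤ n) && checknum m) = 0 := by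
        apply List.countP_eq_zero.mpr
        intro m hm
        have := (PySem.List.mem_pyRange_one).mp hm
        simp only [Bool.and_eq_true, decide_eq_true_eq, not_and]
        intro hmn
        omega
      rw [hz]
      simp [decide_eq_true_eq, show ¬ (j ≤ n) by omega]
    · rw [if_neg hbr]
      have hjn : j ≤ n := by omega
      push_cast at harg ⊢
      by_cases hck : checknum j = true
      · rw [if_pos hck, ih (j+1) (r+1)]
        rw [if_pos (by simp [hjn, hck])]
        rw [harg]
        ring
      · rw [if_neg hck, ih (j+1) r]
        rw [if_neg (by simp [hck])]
        rw [harg]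
        ring

-- ===== more assembly lemmas (statements) =====
lemma dec_pred_pow_succ (D : ℕ) : dec (2 ^ (D+1) - 1) = 10 ^ D + dec (2 ^ D - 1) := by
  have h1 : (0:ℕ) < 2 ^ D := by positivity
  have hsplit : 2 ^ (D+1) - 1 = 2 ^ D + (2 ^ D - 1) := by
    have : (2:ℕ)^(D+1) = 2 * 2^D := by ring
    omega
  rw [hsplit, dec_add_pow D _ (by omega)]

lemma getrange_natCast (D : ℕ) : getrange (D : Int) = ((dec (2 ^ D - 1) : ℕ) : Int) + 1 := by
  induction D with
  | zero =>
    rw [show dec (2 ^ 0 - 1) = 0 from dec_zero]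
    unfold getrange
    rw [PySem.List.pyRange_one_eq_nil (by omega)]
    simp
  | succ D ih =>
    unfold getrange at ih ⊢
    rw [show ((D+1 : ℕ) : Int) = (D : ℕ) + 1 by push_cast; ring]
    rw [PySem.List.pyRange_one_succ_right (by positivity)]
    rw [List.foldl_append, ih]
    simp only [List.foldl_cons, List.foldl_nil]
    rw [dec_pred_pow_succ]
    have ht : ((D : ℕ) : Int).toNat = D := by omega
    rw [ht]
    push_cast
    ring

lemma altScan_eq : ∀ (w : List ℕ), (∀ d ∈ w, d < 10) →
    ∀ r : Int, altScan (w.map Nat.digitChar) r = r * 2 ^ w.length + ((ks w : ℕ) : Int) := by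
  intro w
  induction w with
  | nil => intro _ r; simp [altScan, ks]
  | cons c w ih =>
    intro h r
    have hc : c < 10 := h c List.mem_cons_self
    have htail := ih (fun d hd => h d (List.mem_cons_of_mem _ hd))
    simp only [List.map_cons, altScan, List.length_cons]
    have hz : (Nat.digitChar c = '0') ↔ c = 0 := by
      rw [show '0' = Nat.digitChar 0 from rfl]
      exact digitChar_inj_lt c 0 hc (by norm_num)
    have ho : (Nat.digitChar c = '1') ↔ c = 1 := by
      rw [show '1' = Nat.digitChar 1 from rfl]
      exact digitChar_inj_lt c 1 hc (by norm_num)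
    by_cases hc0 : c = 0
    · rw [if_pos (hz.mpr hc0), htail (2*r)]
      subst hc0
      simp only [ks, if_pos rfl]
      push_cast
      ring
    · rw [if_neg (fun hx => hc0 (hz.mp hx))]
      by_cases hc1 : c = 1
      · rw [if_pos (ho.mpr hc1), htail (2*r+1)]
        subst hc1
        simp only [ks]
        norm_num
        ring
      · rw [if_neg (fun hx => hc1 (ho.mp hx))]
        simp only [ks, if_neg hc0, if_neg hc1]
        have h1 : (1:ℕ) ≤ 2 ^ (w.length + 1) := Nat.one_le_two_pow
        push_cast [h1]
        rw [List.length_map]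
        ring

lemma countP_pyRange (a len : ℕ) (p : Int → Bool) :
    (PySem.List.pyRange (a:Int) ((a:Int) + (len:ℕ)) 1).countP p
      = (List.range' a len).countP (fun m : ℕ => p (m:Int)) := by
  rw [PySem.List.pyRange_one]
  have ht : (((a:Int) + (len:ℕ)) - (a:Int)).toNat = len := by omega
  rw [ht, List.range'_eq_map_range, List.countP_map, List.countP_map]
  apply List.countP_congr
  intro k _
  simp only [Function.comp_apply]
  push_cast
  ring

lemma dec_pow (e : ℕ) : dec (2 ^ e) = 10 ^ e := by
  have := dec_add_pow e 0 (by positivity)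
  simpa [dec_zero] using this

lemma Kmax_bigDigits (N : ℕ) : ks (bigDigits N) = Kmax N := by
  rw [ks_eq_Kmax _ (bigDigits_lt N), vval_bigDigits]

lemma calcnum_alt_natCast (N : ℕ) (hN : 1 ≤ N) : calcnum_alt (N : Int) = ((Kmax N : ℕ) : Int) := by
  unfold calcnum_alt
  rw [if_neg (by omega : ¬ (N:Int) ≤ 0)]
  rw [toChars_natCast N (by omega), altScan_eq _ (bigDigits_lt N) 0, Kmax_bigDigits]
  ring

/- the pure-ℕ core of A's else-branch: initial value + loop count = Kmax N -/
lemma count_interval (N D : ℕ) (hD1 : 1 ≤ D) (hNge : 10 ^ (D-1) ≤ N)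
    (hNlt : N < dec (2 ^ D - 1)) :
    (2 ^ (D-1) - 1) +
      (List.range' (10 ^ (D-1)) (dec (2 ^ D - 1) + 1 - 10 ^ (D-1))).countP
        (fun m => decide (m ≤ N) && only01 m) = Kmax N := by
  set lo := 10 ^ (D-1) with hlo
  set rep := dec (2 ^ D - 1) with hrep
  have hlo1 : 1 ≤ lo := Nat.one_le_pow _ _ (by omega)
  have hsplit1 : rep + 1 - lo = (N + 1 - lo) + (rep - N) := by omega
  rw [hsplit1, ← List.range'_append_1, List.countP_append]
  have hc2 : (List.range' (lo + (N + 1 - lo)) (rep - N)).countP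
      (fun m => decide (m ≤ N) && only01 m) = 0 := by
    apply List.countP_eq_zero.mpr
    intro m hm
    have := List.mem_range'_1.mp hm
    simp only [Bool.and_eq_true, decide_eq_true_eq, not_and]
    intro hmn
    omega
  rw [hc2, Nat.add_zero]
  have hc1 : (List.range' lo (N + 1 - lo)).countP (fun m => decide (m ≤ N) && only01 m)
      = (List.range' lo (N + 1 - lo)).countP (fun m => only01 m && decide (0 < m)) := by
    apply List.countP_congr
    intro m hm
    have := List.mem_range'_1.mp hm
    simp only [Bool.and_eq_true, decide_eq_true_eq]
    constructor
    · rintro ⟨-, h⟩; exact ⟨h, by omega⟩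
    · rintro ⟨h, -⟩; exact ⟨by omega, h⟩
  rw [hc1]
  have hFsplit : F N = (List.range' 0 lo).countP (fun m => only01 m && decide (0 < m)) +
      (List.range' lo (N + 1 - lo)).countP (fun m => only01 m && decide (0 < m)) := by
    unfold F
    rw [List.range_eq_range']
    rw [show N + 1 = lo + (N + 1 - lo) by omega, ← List.range'_append_1, List.countP_append]
    simp
  have hpart1 : (List.range' 0 lo).countP (fun m => only01 m && decide (0 < m)) = 2 ^ (D-1) - 1 := by
    have h1 : (List.range' 0 lo).countP (fun m => only01 m && decide (0 < m)) = F (lo - 1) := by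
      unfold F
      rw [show lo - 1 + 1 = lo by omega, List.range_eq_range']
    rw [h1, F_eq_Kmax]
    apply le_antisymm
    · have h2 : Kmax (lo - 1) < 2 ^ (D-1) := by
        apply Kmax_lt
        rw [dec_pow]
        omega
      omega
    · apply le_Kmax
      have := dec_lt_pow (D-1) (2 ^ (D-1) - 1) (Nat.sub_lt (by positivity) one_pos)
      omega
  rw [hpart1] at hFsplit
  rw [← hFsplit, F_eq_Kmax]

lemma main_natCast (N : ℕ) : calcnum (N : Int) = calcnum_alt (N : Int) := by
  rcases Nat.eq_zero_or_pos N with rfl | hN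
  · decide
  · set D := (Nat.digits 10 N).length with hD
    have hDlog : D = Nat.log 10 N + 1 := Nat.length_digits 10 N (by norm_num) (by omega)
    have hD1 : 1 ≤ D := by omega
    have hNlt : N < 10 ^ D := by
      have := Nat.lt_base_pow_length_digits' (b := 8) (m := N)
      norm_num at this
      exact this
    have hNge : 10 ^ (D-1) ≤ N := by
      rw [hDlog]
      simpa using Nat.pow_log_le_self 10 (x := N) (by omega)
    have hlen : PySem.Str.len (PySem.Int.toStr (N:Int)) = (D : Int) := by
      rw [PySem.Str.len_eq, PySem.Int.toList_toStr, toChars_natCast N (by omega)]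
      simp [bigDigits, hD]
    have hKlt : Kmax N < 2 ^ D := by
      apply Kmax_lt
      rw [dec_pow]
      exact hNlt
    unfold calcnum
    rw [hlen, getrange_natCast D, calcnum_alt_natCast N hN]
    by_cases hbr : _root_.dec (2 ^ D - 1) ≤ N
    · rw [if_pos (by omega)]
      have hK : Kmax N = 2 ^ D - 1 := by
        apply le_antisymm (by omega)
        exact le_Kmax (by omega)
      rw [hK]
      have h1 : (1:ℕ) ≤ 2 ^ D := Nat.one_le_two_pow
      have hTN : ((D:Int)).toNat = D := by omega
      rw [hTN]
      push_cast [h1]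
      ring
    · rw [if_neg (by omega)]
      have hT1 : ((D:Int) - 1).toNat = D - 1 := by omega
      rw [hT1]
      -- rewrite the Int loop bounds into ℕ casts
      have hlo : (10:Int) ^ (D-1) = ((10 ^ (D-1) : ℕ) : Int) := by push_cast; ring
      rw [hlo]
      set fuelN : ℕ := dec (2 ^ D - 1) + 1 - 10 ^ (D-1) with hfuelN
      have hrep_ge : 10 ^ (D-1) ≤ dec (2 ^ D - 1) := by
        apply le_trans _ (pow_le_dec (D-1) (2 ^ D - 1) (by
          have : (2:ℕ) ^ D = 2 * 2 ^ (D-1) := by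
            rw [← pow_succ']
            congr 1
            omega
          have h2 : (1:ℕ) ≤ 2 ^ (D-1) := Nat.one_le_two_pow
          omega))
        omega
      have hfuel : ((((dec (2 ^ D - 1) : ℕ) : Int) + 1) - ((10 ^ (D-1) : ℕ) : Int)).toNat = fuelN := by
        omega
      rw [hfuel]
      rw [calcLoopA_eq]
      rw [countP_pyRange (10 ^ (D-1)) fuelN]
      have hcongr : (List.range' (10 ^ (D-1)) fuelN).countP
          (fun m : ℕ => decide ((m:Int) ≤ (N:Int)) && checknum (m:Int))
          = (List.range' (10 ^ (D-1)) fuelN).countP (fun m => decide (m ≤ N) && only01 m) := by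
        apply List.countP_congr
        intro m _
        rw [checknum_eq m]
        simp
      rw [hcongr]
      have hmain := count_interval N D hD1 hNge (by omega)
      have h1 : (1:ℕ) ≤ 2 ^ (D-1) := Nat.one_le_two_pow
      have hfe : _root_.dec (2 ^ D - 1) + 1 - 10 ^ (D-1) = fuelN := rfl
      rw [hfe] at hmain
      have hcast := congrArg (fun x : ℕ => (x : Int)) hmain
      push_cast [h1] at hcast
      linarith [hcast]

-- ===== VERDICT (by name: the statement is the Claim_ definition above) =====
theorem calcnum_spec : Claim_unchanged_calcnum := by
  intro n _ hnd
  have hn : 0 ≤ n := by unfold D_calcnum at hnd; omega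
  have hcast : n = ((n.toNat : ℕ) : Int) := by omega
  rw [hcast]
  exact main_natCast n.toNat

theorem calcnum_changed : Claim_changed_calcnum := by
  unfold Claim_changed_calcnum; decide

lemma toDigits_ne_nil (m : ℕ) : Nat.toDigits 10 m ≠ [] := by
  rcases Nat.eq_zero_or_pos m with rfl | hm
  · decide
  · rw [toDigits_eq m (by omega)]
    simp [Nat.digits_ne_nil_iff_ne_zero]
    omega

theorem calcnum_tight : Claim_exact_calcnum := by
  intro n _ hD
  unfold D_calcnum at hD
  have hchars : PySem.Int.toChars n = '-' :: Nat.toDigits 10 n.natAbs := by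
    unfold PySem.Int.toChars
    rw [if_pos hD]
  set L : ℕ := (Nat.toDigits 10 n.natAbs).length with hL
  have hL1 : 1 ≤ L := by
    have := toDigits_ne_nil n.natAbs
    rw [hL]
    cases hcl : Nat.toDigits 10 n.natAbs with
    | nil => exact absurd hcl this
    | cons a l => simp
  have hlen : PySem.Str.len (PySem.Int.toStr n) = ((L + 1 : ℕ) : Int) := by
    rw [PySem.Str.len_eq, PySem.Int.toList_toStr, hchars]
    simp [hL]
  have hBzero : calcnum_alt n = 0 := by
    unfold calcnum_alt
    rw [if_pos (by omega)]
  rw [hBzero]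
  unfold calcnum
  rw [hlen, getrange_natCast (L+1)]
  rw [if_neg (by
    have : (0:Int) ≤ ((dec (2 ^ (L+1) - 1) : ℕ) : Int) := by positivity
    omega)]
  have hT1 : (((L + 1 : ℕ) : Int) - 1).toNat = L := by omega
  rw [hT1]
  have hr0 : (1:Int) ≤ 2 ^ L := one_le_pow₀ (by omega)
  have hr2 : (2:Int) ≤ 2 ^ L := by
    calc (2:Int) = 2 ^ 1 := by ring
      _ ≤ 2 ^ L := pow_le_pow_right₀ (by omega) hL1
  have hlopos : (0:Int) < 10 ^ L := by positivity
  cases hf : (((_root_.dec (2 ^ (L+1) - 1) : ℕ) : Int) + 1 - 10 ^ L).toNat with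
  | zero =>
    simp only [calcLoopA]
    intro hx
    linarith
  | succ k =>
    simp only [calcLoopA]
    rw [if_pos (by linarith : (10:Int) ^ L > n)]
    intro hx
    linarith
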